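-- pv_equiv track=rewrite | github.com/ThePhilgrim/MantaTail | server.py | parse_received_command
-- ===== SOURCE A (Python) =====
-- from typing import Dict, Optional, List, Set, Tuple
--
-- def parse_received_command(msg: str) -> Tuple[str, List[str]]:
--     """
--     Parses the user command by separating the command (e.g "join", "privmsg", etc.) from the
--     arguments.
--
--     If a parameter contains spaces, it must start with ':' to be interpreted as one parameter.
--     If the parameter does not start with ':', it will be cut off at the first space.
--
--     Ex:
--         - "PRIVMSG #foo :This is a message\r\n" will send "This is a message"
--         - "PRIVMSG #foo This is a message\r\n" will send "This"
--     """
--     split_msg = msg.split(" ")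
--
--     for num, arg in enumerate(split_msg):
--         if arg.startswith(":"):
--             parsed_msg = split_msg[:num]
--             parsed_msg.append(" ".join(split_msg[num:])[1:])
--             command = parsed_msg[0]
--             return command, parsed_msg[1:]
--
--     command = split_msg[0]
--     return command, split_msg[1:]
-- ===== SOURCE B (Python) =====
-- from typing import List, Tuple
--
--
-- def parse_received_command(msg: str) -> Tuple[str, List[str]]:
--     if msg.startswith(":"):
--         return msg[1:], []
--     i = msg.find(" :")
--     if i == -1:
--         parts = msg.split(" ")
--         return parts[0], parts[1:]
--     tokens = msg[:i].split(" ")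
--     return tokens[0], tokens[1:] + [msg[i + 2:]]
-- ===== Notes on version B (the rewrite author's own statement) =====
-- stated objective: idiomatic
-- what changed: B locates the trailing-parameter boundary with a single substring search msg.find(' :') (plus a startswith(':') check for a leading colon) instead of tokenizing the whole message and scanning the token list with enumerate for a token starting with ':'.
import Mathlib
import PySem

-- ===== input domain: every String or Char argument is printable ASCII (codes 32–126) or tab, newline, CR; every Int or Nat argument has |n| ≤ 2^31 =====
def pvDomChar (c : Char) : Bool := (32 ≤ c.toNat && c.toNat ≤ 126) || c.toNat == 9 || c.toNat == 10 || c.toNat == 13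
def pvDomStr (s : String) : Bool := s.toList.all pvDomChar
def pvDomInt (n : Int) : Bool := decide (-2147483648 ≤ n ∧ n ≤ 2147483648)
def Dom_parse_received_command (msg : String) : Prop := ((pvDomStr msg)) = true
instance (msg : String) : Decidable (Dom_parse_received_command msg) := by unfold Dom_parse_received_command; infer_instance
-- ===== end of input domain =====

-- B replaces A's tokenize-then-scan-with-enumerate by a direct substring search for " :" (idiomatic; same cost).

-- ===== PORT A =====
-- the 'for num, arg in enumerate(split_msg)' loop, carrying the full split_msg for the slices
def parseLoopA (split_msg : List String) : Nat → List String → String × List String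
  | _, [] =>
    -- loop fell through: command = split_msg[0]; str.split always returns at least one piece
    (split_msg.headD "", split_msg.drop 1)
  | num, arg :: rest =>
    if PySem.Str.startswith arg ":" then
      let parsed_msg := PySem.List.slice split_msg none (some (num : Int)) ++
        [PySem.Str.slice (PySem.Str.join " " (PySem.List.slice split_msg (some (num : Int)) none)) (some 1) none]
      (parsed_msg.headD "", parsed_msg.drop 1)
    else parseLoopA split_msg (num + 1) rest

def parse_received_command (msg : String) : String × List String :=
  let split_msg := (PySem.Str.split? msg " ").getD []   -- sep " " ≠ "", so split? is always some
  parseLoopA split_msg 0 split_msg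

-- ===== PORT B =====
def parse_received_command_alt (msg : String) : String × List String :=
  if PySem.Str.startswith msg ":" then (PySem.Str.slice msg (some 1) none, [])
  else
    let i := PySem.Str.find msg " :"
    if i = -1 then
      let parts := (PySem.Str.split? msg " ").getD []   -- sep " " ≠ "", so split? is always some
      (parts.headD "", parts.drop 1)
    else
      let tokens := (PySem.Str.split? (PySem.Str.slice msg none (some i)) " ").getD []
      (tokens.headD "", tokens.drop 1 ++ [PySem.Str.slice msg (some (i + 2)) none])

-- ===== PRECONDITION & SPEC =====
def Spec_parse_received_command (msg : String) (out : String × List String) : Prop := out = parse_received_command_alt msg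
instance (msg : String) (out : String × List String) : Decidable (Spec_parse_received_command msg out) := by unfold Spec_parse_received_command; infer_instance

-- ===== CLAIM (what is proved, stated in full; the proofs are below) =====
def Claim_equal_parse_received_command : Prop := ∀ (msg : String), Dom_parse_received_command msg → Spec_parse_received_command msg (parse_received_command msg)

-- ===== LEMMAS AND PROOFS =====


theorem pvSplitOnGo (fuel : Nat) : ∀ (l cur : List Char) (acc : List (List Char)), l.length < fuel →
    PySem.Chars.splitOn.go [' '] fuel l cur acc
      = acc.reverse ++ (List.splitOnP (· == ' ') l).modifyHead (cur.reverse ++ ·) := by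
  induction fuel with
  | zero => intro l cur acc h; omega
  | succ n ih =>
    intro l cur acc h
    match l with
    | [] => simp [PySem.Chars.splitOn.go, List.splitOnP_nil]
    | c :: rest =>
      rw [PySem.Chars.splitOn.go, List.splitOnP_cons]
      by_cases hc : c = ' '
      · subst hc
        simp only [List.isPrefixOf, beq_self_eq_true, Bool.and_true, if_true,
          List.length_cons, List.length_nil, Nat.zero_add, List.drop_succ_cons, List.drop_zero]
        rw [ih rest [] (cur.reverse :: acc) (by simp at h; omega)]
        rcases hsp : List.splitOnP (· == ' ') rest with _ | ⟨hh, tt⟩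
        · exact absurd hsp (List.splitOnP_ne_nil _ _)
        · simp
      · have h1 : (' ' == c && true) = false := by
          simp only [Bool.and_true, beq_eq_false_iff_ne, ne_eq]; exact fun h' => hc h'.symm
        have h2 : (c == ' ') = false := by simp [hc]
        simp only [List.isPrefixOf, Bool.and_true, h1, h2, if_false, Bool.false_eq_true]
        rw [ih rest (c :: cur) acc (by simp at h ⊢; omega)]
        rcases hsp : List.splitOnP (· == ' ') rest with _ | ⟨hh, tt⟩
        · exact absurd hsp (List.splitOnP_ne_nil _ _)
        · simp

theorem pvSplitOnEq (cs : List Char) :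
    PySem.Chars.splitOn cs [' '] = List.splitOn ' ' cs := by
  rw [PySem.Chars.splitOn, pvSplitOnGo (cs.length + 1) cs [] [] (by omega)]
  rcases hsp : List.splitOnP (· == ' ') cs with _ | ⟨hh, tt⟩
  · exact absurd hsp (List.splitOnP_ne_nil _ _)
  · simp only [List.splitOn, hsp, List.modifyHead, List.nil_append, List.reverse_nil]

theorem pvClean (cs : List Char) : ∀ t ∈ List.splitOn ' ' cs, ' ' ∉ t := by
  rw [List.splitOn]
  induction cs with
  | nil => simp [List.splitOnP_nil]
  | cons c rest ih =>
    rw [List.splitOnP_cons]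
    by_cases hc : c = ' '
    · simp [hc]; exact ih
    · simp only [show (c == ' ') = false by simp [hc], Bool.false_eq_true, if_false]
      rcases hsp : List.splitOnP (· == ' ') rest with _ | ⟨hh, tt⟩
      · exact absurd hsp (List.splitOnP_ne_nil _ _)
      · rw [hsp] at ih
        intro t ht
        simp only [List.modifyHead, List.mem_cons] at ht
        rcases ht with h1 | h2
        · subst h1; intro hmem
          rcases List.mem_cons.mp hmem with h | h
          · exact hc h.symm
          · exact ih hh (List.mem_cons_self) h
        · exact ih t (List.mem_cons_of_mem _ h2)

theorem pvIntercEq (t : List Char) (ts : List (List Char)) :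
    [' '].intercalate (t :: ts) = t ++ (ts.map (' ' :: ·)).flatten := by
  induction ts generalizing t with
  | nil => simp [List.intercalate]
  | cons u us ih =>
    have h2 : [' '].intercalate (t :: u :: us) = t ++ [' '] ++ [' '].intercalate (u :: us) := by
      simp [List.intercalate, List.intersperse]
    rw [h2, ih u]
    simp

theorem pvHeadStarts (cs : List Char) :
    ([':'] <+: (List.splitOn ' ' cs).headD []) ↔ ([':'] <+: cs) := by
  rw [List.splitOn]
  match cs with
  | [] => simp [List.splitOnP_nil]
  | c :: rest =>
    rw [List.splitOnP_cons]
    by_cases hc : c = ' '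
    · subst hc
      simp only [beq_self_eq_true, if_true, List.headD_cons]
      constructor
      · intro h; exact absurd h (by simp)
      · intro h
        rcases h with ⟨r, hr⟩
        simp only [List.singleton_append, List.cons.injEq] at hr
        exact absurd hr.1 (by decide)
    · simp only [show (c == ' ') = false by simp [hc], Bool.false_eq_true, if_false]
      rcases hsp : List.splitOnP (· == ' ') rest with _ | ⟨hh, tt⟩
      · exact absurd hsp (List.splitOnP_ne_nil _ _)
      · simp only [List.modifyHead, List.headD_cons]
        constructor
        · intro h
          rcases h with ⟨r, hr⟩
          simp only [List.singleton_append, List.cons.injEq] at hr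
          exact ⟨rest, by rw [← hr.1]; rfl⟩
        · intro h
          rcases h with ⟨r, hr⟩
          simp only [List.singleton_append, List.cons.injEq] at hr
          exact ⟨hh, by rw [← hr.1]; rfl⟩


theorem pvGoSkip (t : List Char) (ht : ' ' ∉ t) : ∀ (r : List Char) (k : Nat),
    PySem.Chars.find.go [' ', ':'] (t ++ r) k = PySem.Chars.find.go [' ', ':'] r (k + t.length) := by
  induction t with
  | nil => intro r k; simp
  | cons c t ih =>
    intro r k
    have hc : c ≠ ' ' := fun h => ht (h ▸ List.mem_cons_self)
    rw [List.cons_append, PySem.Chars.find.go]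
    have hpre : List.isPrefixOf [' ', ':'] (c :: (t ++ r)) = false := by
      simp only [List.isPrefixOf, Bool.and_eq_false_iff, beq_eq_false_iff_ne, ne_eq]
      left; exact fun h => hc h.symm
    rw [hpre]
    simp only [Bool.false_eq_true, if_false]
    rw [ih (fun h => ht (List.mem_cons_of_mem _ h)) r (k + 1)]
    congr 1
    simp [List.length_cons]; omega

theorem pvColonPre (t : List Char) (ts : List (List Char)) :
    List.isPrefixOf [':'] (t ++ (ts.map (' ' :: ·)).flatten) = decide ([':'] <+: t) := by
  match t with
  | [] =>
    match ts with
    | [] => simp [List.isPrefixOf]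
    | u :: us => simp [List.isPrefixOf]
  | c :: t' =>
    simp only [List.cons_append, List.isPrefixOf, Bool.and_true]
    rcases eq_or_ne c ':' with h | h
    · subst h; simp [List.prefix_cons_iff]
    · have h1 : (':' == c) = false := by
        simp only [beq_eq_false_iff_ne, ne_eq]; exact fun hx => h hx.symm
      have h2 : decide ([':'] <+: c :: t') = false := by
        simp only [decide_eq_false_iff_not]
        intro hx; rcases hx with ⟨r, hr⟩
        simp only [List.singleton_append, List.cons.injEq] at hr
        exact h hr.1.symm
      rw [h1, h2]

theorem pvFindFlat (ts : List (List Char)) : ∀ (k : Nat), (∀ t ∈ ts, ' ' ∉ t) →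
    PySem.Chars.find.go [' ', ':'] ((ts.map (' ' :: ·)).flatten) k
      = match List.findIdx? (fun t => decide ([':'] <+: t)) ts with
        | none => -1
        | some j => (k : Int) + (((ts.take j).map (' ' :: ·)).flatten).length := by
  induction ts with
  | nil => intro k hcl; simp [PySem.Chars.find.go, List.findIdx?_nil]
  | cons t ts ih =>
    intro k hcl
    simp only [List.map_cons, List.flatten_cons, List.cons_append]
    rw [PySem.Chars.find.go]
    have hpre : List.isPrefixOf [' ', ':'] (' ' :: (t ++ (ts.map (' ' :: ·)).flatten))
        = decide ([':'] <+: t) := by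
      simp only [List.isPrefixOf, beq_self_eq_true, Bool.true_and, Bool.and_true]
      exact pvColonPre t ts
    rw [hpre, List.findIdx?_cons]
    by_cases hp : [':'] <+: t
    · simp [hp]
    · simp only [hp, decide_false, Bool.false_eq_true, if_false]
      rw [pvGoSkip t (hcl t List.mem_cons_self) _ (k + 1)]
      rw [ih (k + 1 + t.length) (fun u hu => hcl u (List.mem_cons_of_mem _ hu))]
      rcases hidx : List.findIdx? (fun t => decide ([':'] <+: t)) ts with _ | j
      · simp
      · simp only [Option.map_some]
        simp only [List.take_succ_cons, List.map_cons, List.flatten_cons, List.length_append,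
          List.length_cons]
        push_cast
        ring


-- characterization of A's loop over the remaining (arg) list
theorem pvLoopA (SL : List String) : ∀ (rest : List String) (num : Nat), rest = SL.drop num →
    parseLoopA SL num rest
      = match List.findIdx? (fun a => PySem.Str.startswith a ":") rest with
        | none => (SL.headD "", SL.drop 1)
        | some j =>
          let parsed_msg := PySem.List.slice SL none (some ((num + j : Nat) : Int)) ++
            [PySem.Str.slice (PySem.Str.join " " (PySem.List.slice SL (some ((num + j : Nat) : Int)) none)) (some 1) none]
          (parsed_msg.headD "", parsed_msg.drop 1) := by
  intro rest
  induction rest with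
  | nil => intro num h; simp [parseLoopA, List.findIdx?_nil]
  | cons a r ih =>
    intro num hnum
    rw [parseLoopA, List.findIdx?_cons]
    by_cases hs : PySem.Str.startswith a ":" = true
    · simp only [hs, if_true, Nat.add_zero]
    · have hr : r = SL.drop (num + 1) := by
        have h1 := congrArg (List.drop 1) hnum
        simpa [List.drop_drop, Nat.add_comm] using h1
      simp only [hs, Bool.false_eq_true, if_false]
      rw [ih (num + 1) hr]
      rcases hj : List.findIdx? (fun a => PySem.Str.startswith a ":") r with _ | j
      · rfl
      · simp only [Option.map_some]
        have he : num + 1 + j = num + (j + 1) := by omega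
        rw [he]

-- split?(" ").getD [] computes List.splitOn
theorem pvSplitGetD (s : String) :
    (PySem.Str.split? s " ").getD [] = List.map String.ofList (List.splitOn ' ' s.toList) := by
  simp [PySem.Str.split?, PySem.Chars.split?, pvSplitOnEq]

-- Str-level startswith ":" on an ofList token is the list-level prefix test
theorem pvIdxMap (L : List (List Char)) :
    List.findIdx? (fun a => PySem.Str.startswith a ":") (List.map String.ofList L)
      = List.findIdx? (fun t => decide ([':'] <+: t)) L := by
  rw [List.findIdx?_map]
  congr 1
  funext t
  simp only [Function.comp, PySem.Str.startswith_eq, String.toList_ofList]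
  by_cases h : [':'] <+: t
  · rw [decide_eq_true h]
    exact (PySem.Chars.startswith_iff t [':']).mpr h
  · rw [decide_eq_false h, Bool.eq_false_iff]
    exact fun hb => h ((PySem.Chars.startswith_iff t [':']).mp hb)

-- ===== VERDICT (by name: the statement is the Claim_ definition above) =====
theorem parse_received_command_spec : Claim_equal_parse_received_command := by
  intro msg _
  unfold Spec_parse_received_command parse_received_command parse_received_command_alt
  obtain ⟨t0, ts, hLdef⟩ : ∃ t0 ts, List.splitOn ' ' msg.toList = t0 :: ts := by
    rcases h : List.splitOn ' ' msg.toList with _ | ⟨a, b⟩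
    · exact absurd h (by rw [List.splitOn]; exact List.splitOnP_ne_nil _ _)
    · exact ⟨a, b, rfl⟩
  have hclean := pvClean msg.toList
  rw [hLdef] at hclean
  have hcs : msg.toList = t0 ++ (ts.map (' ' :: ·)).flatten := by
    conv_lhs => rw [← List.intercalate_splitOn msg.toList ' ', hLdef, pvIntercEq]
  have hHead := pvHeadStarts msg.toList
  rw [hLdef] at hHead
  simp only [List.headD_cons] at hHead
  simp only [pvSplitGetD, hLdef]
  rw [pvLoopA _ _ 0 (by simp), pvIdxMap, List.findIdx?_cons]
  by_cases hpre : [':'] <+: msg.toList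
  · -- leading-colon command
    have hstart : PySem.Str.startswith msg ":" = true := by
      rw [PySem.Str.startswith_eq]
      exact (PySem.Chars.startswith_iff msg.toList [':']).mpr hpre
    have hpt0 : decide ([':'] <+: t0) = true := decide_eq_true (hHead.mpr hpre)
    simp only [hpt0, if_true, hstart]
    have h0 : ((0 + 0 : Nat) : Int) = (0 : Int) := by norm_num
    rw [h0, PySem.List.slice_to _ (by norm_num), PySem.List.slice_from _ (by norm_num)]
    simp only [Int.toNat_zero, List.take_zero, List.drop_zero, List.nil_append,
      List.headD_cons, List.drop_succ_cons]
    have hjoin : PySem.Str.join " " (List.map String.ofList (t0 :: ts)) = msg := by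
      apply String.toList_inj.mp
      rw [PySem.Str.toList_join]
      simp only [List.map_map]
      have : (String.toList ∘ String.ofList) = id := by funext l; simp [String.toList_ofList]
      rw [this, List.map_id]
      show [' '].intercalate (t0 :: ts) = msg.toList
      rw [← hLdef, List.intercalate_splitOn]
    rw [hjoin]
  · -- no leading colon: B searches for " :"
    have hstart : PySem.Str.startswith msg ":" = false := by
      rw [PySem.Str.startswith_eq, Bool.eq_false_iff]
      exact fun hb => hpre ((PySem.Chars.startswith_iff msg.toList [':']).mp hb)
    have hpt0 : decide ([':'] <+: t0) = false := decide_eq_false (fun h => hpre (hHead.mp h))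
    have hfind : PySem.Str.find msg " :"
        = PySem.Chars.find.go [' ', ':'] ((ts.map (' ' :: ·)).flatten) (0 + t0.length) := by
      show PySem.Chars.find.go [' ', ':'] msg.toList 0 = _
      rw [hcs, pvGoSkip t0 (hclean t0 List.mem_cons_self) _ 0]
    rw [pvFindFlat ts (0 + t0.length) (fun u hu => hclean u (List.mem_cons_of_mem _ hu))] at hfind
    simp only [hpt0, Bool.false_eq_true, if_false, hstart]
    rcases hidx : List.findIdx? (fun t => decide ([':'] <+: t)) ts with _ | j
    · -- no " :" anywhere
      rw [hidx] at hfind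
      simp only [hfind, Option.map_none, pvSplitGetD, hLdef]
      simp
    · -- first colon-token at position j+1
      rw [hidx] at hfind
      have hj : j < ts.length := (List.findIdx?_eq_some_iff_findIdx_eq.mp hidx).1
      set X := ((ts.take j).map (' ' :: ·)).flatten with hX
      have hE : PySem.Str.find msg " :" = ((t0.length + X.length : Nat) : Int) := by
        rw [hfind]; push_cast; ring
      have hne : PySem.Str.find msg " :" ≠ -1 := by rw [hE]; omega
      rw [if_neg hne]
      simp only [Option.map_some]
      -- decompose msg at the boundary
      have hsplit2 : msg.toList = (t0 ++ X) ++ (((ts.drop j).map (' ' :: ·)).flatten) := by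
        rw [hcs, hX, List.append_assoc, ← List.flatten_append, ← List.map_append,
          List.take_append_drop]
      have hlen : (t0 ++ X).length = t0.length + X.length := List.length_append
      -- B's head part
      have htok : (PySem.Str.slice msg none (some (PySem.Str.find msg " :"))).toList
          = t0 ++ X := by
        rw [PySem.Str.toList_slice, PySem.Chars.slice_eq_listSlice, hE,
          PySem.List.slice_to _ (by omega)]
        rw [hsplit2, Int.toNat_natCast, List.take_left' hlen]
      have htokSplit : List.splitOn ' ' (t0 ++ X) = t0 :: ts.take j := by
        have : t0 ++ X = [' '].intercalate (t0 :: ts.take j) := by rw [pvIntercEq, hX, List.map_take]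
        rw [this]
        refine List.splitOn_intercalate _ _ ?_ (by simp)
        intro l hl
        rcases List.mem_cons.mp hl with h | h
        · subst h; exact hclean l List.mem_cons_self
        · exact hclean l (List.mem_cons_of_mem _ (List.mem_of_mem_take h))
      -- A's slices
      have h0j : ((0 + (j + 1) : Nat) : Int) = (((j + 1 : Nat)) : Int) := by norm_num
      rw [h0j, PySem.List.slice_to _ (by omega), PySem.List.slice_from _ (by omega)]
      simp only [Int.toNat_natCast, List.take_succ_cons, List.drop_succ_cons, ← List.map_take,
        ← List.map_drop, List.map_cons]
      -- the joined trailing parameter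
      obtain ⟨u, rest, hur⟩ : ∃ u rest, ts.drop j = u :: rest :=
        ⟨ts[j], ts.drop (j + 1), (List.getElem_cons_drop hj).symm⟩
      have hflat : ((ts.drop j).map (' ' :: ·)).flatten = ' ' :: [' '].intercalate (ts.drop j) := by
        rw [hur, pvIntercEq]
        simp
      have htail : PySem.Str.slice (PySem.Str.join " " (List.map String.ofList (ts.drop j))) (some 1) none
          = PySem.Str.slice msg (some (PySem.Str.find msg " :" + 2)) none := by
        apply String.toList_inj.mp
        rw [PySem.Str.toList_slice, PySem.Str.toList_slice, PySem.Chars.slice_eq_listSlice,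
          PySem.Chars.slice_eq_listSlice, PySem.Str.toList_join]
        have hE2 : PySem.Str.find msg " :" + 2 = ((t0.length + X.length + 2 : Nat) : Int) := by
          rw [hE]; push_cast; ring
        rw [hE2, PySem.List.slice_from _ (by omega), PySem.List.slice_from _ (by omega)]
        simp only [Int.toNat_natCast, Int.toNat_one, List.map_map]
        have hmapid : (String.toList ∘ String.ofList) = id := by funext l; simp [String.toList_ofList]
        rw [hmapid, List.map_id]
        show List.drop 1 ([' '].intercalate (ts.drop j)) = List.drop (t0.length + X.length + 2) msg.toList
        rw [hsplit2, show t0.length + X.length + 2 = (t0 ++ X).length + 2 by rw [hlen],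
          ← List.drop_drop, List.drop_left' rfl, hflat]
        simp
      -- assemble
      rw [htok, htokSplit, htail]
      simp
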